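-- pv_equiv track=rewrite | github.com/CPCReady/skills | skills/amstrad-catalog/scripts/amstrad_catalog.py | count_block_types
-- ===== SOURCE A (Python) =====
-- from typing import Any, Dict, Iterable, List, Optional, Sequence, Tuple
--
-- def count_block_types(blocks: Iterable[Dict[str, Any]]) -> Dict[str, int]:
--     turbo = 0
--     pure = 0
--     normal = 0
--     pause = 0
--     for block in blocks:
--         block_type = str(block.get("type", "")).lower()
--         if "turbo" in block_type:
--             turbo += 1
--         elif "pure" in block_type:
--             pure += 1
--         elif "normal" in block_type:
--             normal += 1
--         elif "pause" in block_type: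
--             pause += 1
--     return {
--         "turbo": turbo,
--         "pure": pure,
--         "normal": normal,
--         "pause": pause,
--     }
-- ===== SOURCE B (Python) =====
-- from typing import Any, Dict, Iterable
--
--
-- def count_block_types(blocks: Iterable[Dict[str, Any]]) -> Dict[str, int]:
--     # Sieve cascade: lower all types once, then for each category in priority
--     # order count the matching entries and remove them before the next pass.
--     remaining = [str(b.get("type", "")).lower() for b in blocks]
--     counts = {}
--     for cat in ("turbo", "pure", "normal", "pause"):
--         counts[cat] = sum(1 for t in remaining if cat in t)
--         remaining = [t for t in remaining if cat not in t]
--     return counts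
-- ===== Notes on version B (the rewrite author's own statement) =====
-- stated objective: alternative
-- what changed: Replaces A's single pass with per-block elif ladder and four mutable counters by a sieve cascade: all types are lowered into one list, then each category in priority order gets its own pass that counts its matches and filters them out of the list before the next category is considered.
import Mathlib
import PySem

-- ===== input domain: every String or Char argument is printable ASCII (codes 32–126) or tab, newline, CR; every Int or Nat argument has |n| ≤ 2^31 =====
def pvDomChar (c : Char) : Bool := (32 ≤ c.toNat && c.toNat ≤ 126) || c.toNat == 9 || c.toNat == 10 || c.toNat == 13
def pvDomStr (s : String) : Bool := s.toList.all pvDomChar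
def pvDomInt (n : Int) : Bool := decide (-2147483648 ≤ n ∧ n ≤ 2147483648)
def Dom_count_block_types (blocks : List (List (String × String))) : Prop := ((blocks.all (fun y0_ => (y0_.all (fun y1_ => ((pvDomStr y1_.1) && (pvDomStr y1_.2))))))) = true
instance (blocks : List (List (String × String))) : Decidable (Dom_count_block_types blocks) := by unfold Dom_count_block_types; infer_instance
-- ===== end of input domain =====

-- B replaces A's one-pass elif ladder with four counters by a sieve cascade: the lowered types
-- are listed once, then each category in priority order counts its matches and filters them out.

-- shared subexpression of both sources: str(block.get("type", "")).lower()
def cbtType (block : List (String × String)) : String :=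
  PySem.Str.lower ((PySem.Dict.ofList block).getD "type" "")

-- ===== PORT A =====
-- one iteration of A's loop; state = (turbo, pure, normal, pause)
def cbtStep (s : Int × Int × Int × Int) (block : List (String × String)) : Int × Int × Int × Int :=
  let block_type := cbtType block
  if PySem.Str.isIn "turbo" block_type then (s.1 + 1, s.2.1, s.2.2.1, s.2.2.2)
  else if PySem.Str.isIn "pure" block_type then (s.1, s.2.1 + 1, s.2.2.1, s.2.2.2)
  else if PySem.Str.isIn "normal" block_type then (s.1, s.2.1, s.2.2.1 + 1, s.2.2.2)
  else if PySem.Str.isIn "pause" block_type then (s.1, s.2.1, s.2.2.1, s.2.2.2 + 1)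
  else s

def count_block_types (blocks : List (List (String × String))) : List (String × Int) :=
  let s := blocks.foldl cbtStep (0, 0, 0, 0)
  [("turbo", s.1), ("pure", s.2.1), ("normal", s.2.2.1), ("pause", s.2.2.2)]

-- ===== PORT B =====
-- the for-loop over ("turbo","pure","normal","pause"): count matches of cat, then filter them out
def cbtCascade : List String → List String → List (String × Int)
  | [], _ => []
  | cat :: cats, remaining =>
      (cat, ((remaining.countP (fun t => PySem.Str.isIn cat t) : Nat) : Int)) ::
        cbtCascade cats (remaining.filter (fun t => !(PySem.Str.isIn cat t)))

def count_block_types_alt (blocks : List (List (String × String))) : List (String × Int) :=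
  let remaining := blocks.map cbtType
  cbtCascade ["turbo", "pure", "normal", "pause"] remaining

-- ===== PRECONDITION & SPEC =====
def Spec_count_block_types (blocks : List (List (String × String))) (out : List (String × Int)) : Prop := out = count_block_types_alt blocks
instance (blocks : List (List (String × String))) (out : List (String × Int)) : Decidable (Spec_count_block_types blocks out) := by unfold Spec_count_block_types; infer_instance

-- ===== CLAIM =====
def Claim_equal_count_block_types : Prop := ∀ (blocks : List (List (String × String))), Dom_count_block_types blocks → Spec_count_block_types blocks (count_block_types blocks)

-- ===== LEMMAS AND PROOFS =====

-- A's loop counts, per category, the types matching it and none of the earlier categories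
lemma cbt_fold (blocks : List (List (String × String))) (s : Int × Int × Int × Int) :
    blocks.foldl cbtStep s =
      (s.1 + ((blocks.map cbtType).countP (fun t => PySem.Str.isIn "turbo" t) : Int),
       s.2.1 + ((blocks.map cbtType).countP
         (fun t => !PySem.Str.isIn "turbo" t && PySem.Str.isIn "pure" t) : Int),
       s.2.2.1 + ((blocks.map cbtType).countP
         (fun t => !PySem.Str.isIn "turbo" t && !PySem.Str.isIn "pure" t && PySem.Str.isIn "normal" t) : Int),
       s.2.2.2 + ((blocks.map cbtType).countP
         (fun t => !PySem.Str.isIn "turbo" t && !PySem.Str.isIn "pure" t && !PySem.Str.isIn "normal" t && PySem.Str.isIn "pause" t) : Int)) := by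
  induction blocks generalizing s with
  | nil => simp
  | cons hd tl ih =>
    simp only [List.foldl_cons, List.map_cons, List.countP_cons, ih, cbtStep]
    cases h1 : PySem.Str.isIn "turbo" (cbtType hd) <;>
      cases h2 : PySem.Str.isIn "pure" (cbtType hd) <;>
        cases h3 : PySem.Str.isIn "normal" (cbtType hd) <;>
          cases h4 : PySem.Str.isIn "pause" (cbtType hd) <;>
            simp [Prod.ext_iff] <;> omega

-- B's cascade over any list of lowered types yields exactly the first-match counts
lemma cbt_cascade_eq (ts : List String) :
    cbtCascade ["turbo", "pure", "normal", "pause"] ts =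
      [("turbo", (ts.countP (fun t => PySem.Str.isIn "turbo" t) : Int)),
       ("pure", (ts.countP (fun t => !PySem.Str.isIn "turbo" t && PySem.Str.isIn "pure" t) : Int)),
       ("normal", (ts.countP (fun t => !PySem.Str.isIn "turbo" t && !PySem.Str.isIn "pure" t && PySem.Str.isIn "normal" t) : Int)),
       ("pause", (ts.countP (fun t => !PySem.Str.isIn "turbo" t && !PySem.Str.isIn "pure" t && !PySem.Str.isIn "normal" t && PySem.Str.isIn "pause" t) : Int))] := by
  have h2 : ∀ t : String, (PySem.Str.isIn "pure" t && !PySem.Str.isIn "turbo" t)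
      = (!PySem.Str.isIn "turbo" t && PySem.Str.isIn "pure" t) :=
    fun t => Bool.and_comm _ _
  have h3 : ∀ t : String, (PySem.Str.isIn "normal" t && (!PySem.Str.isIn "pure" t && !PySem.Str.isIn "turbo" t))
      = (!PySem.Str.isIn "turbo" t && (!PySem.Str.isIn "pure" t && PySem.Str.isIn "normal" t)) := by
    intro t
    cases PySem.Str.isIn "normal" t <;> cases PySem.Str.isIn "turbo" t <;>
      cases PySem.Str.isIn "pure" t <;> rfl
  have h4 : ∀ t : String, (PySem.Str.isIn "pause" t && (!PySem.Str.isIn "normal" t && (!PySem.Str.isIn "pure" t && !PySem.Str.isIn "turbo" t)))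
      = (!PySem.Str.isIn "turbo" t && (!PySem.Str.isIn "pure" t && (!PySem.Str.isIn "normal" t && PySem.Str.isIn "pause" t))) := by
    intro t
    cases PySem.Str.isIn "pause" t <;> cases PySem.Str.isIn "turbo" t <;>
      cases PySem.Str.isIn "pure" t <;> cases PySem.Str.isIn "normal" t <;> rfl
  simp only [cbtCascade, List.countP_filter, List.filter_filter, Bool.and_assoc, h2, h3, h4]

-- ===== VERDICT =====
theorem count_block_types_spec : Claim_equal_count_block_types := by
  intro blocks _
  unfold Spec_count_block_types count_block_types count_block_types_alt
  simp only [cbt_fold, cbt_cascade_eq, List.countP_map, Function.comp_def, zero_add]
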